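-- pv_equiv track=rewrite | github.com/Ap1234567/search-movies321 | migrate_to_postgress.py | json_to_table
-- ===== SOURCE A (Python) =====
-- def json_to_table(movies, column_name):
--     entities = {}
--     entitities_values = set()
--     for line in movies[column_name]:
--         for x in line:
--             key = x["id"]
--             value = x["name"]
--             if value not in entitities_values:
--                 entitities_values.add(value)
--                 entities[key] = value
--     return entities
-- ===== SOURCE B (Python) =====
-- def json_to_table(movies, column_name):
--     # staged: flatten, compute first index per name, then keep exactly the
--     # first-occurrence-per-name pairs and build the dict in one dict() call
--     pairs = [(x["id"], x["name"]) for line in movies[column_name] for x in line]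
--     first_idx = {}
--     for i, (_, name) in enumerate(pairs):
--         if name not in first_idx:
--             first_idx[name] = i
--     return dict(p for i, p in enumerate(pairs) if first_idx[p[1]] == i)
-- ===== Notes on version B (the rewrite author's own statement) =====
-- stated objective: alternative
-- what changed: B replaces A's single nested pass carrying two accumulators (id-keyed dict + seen-names set) by three staged passes: flatten the nested json into a flat (id,name) list, compute a first-occurrence index per name, then build the result with one dict() call over the pairs whose index is their name's first index.
import Mathlib
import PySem

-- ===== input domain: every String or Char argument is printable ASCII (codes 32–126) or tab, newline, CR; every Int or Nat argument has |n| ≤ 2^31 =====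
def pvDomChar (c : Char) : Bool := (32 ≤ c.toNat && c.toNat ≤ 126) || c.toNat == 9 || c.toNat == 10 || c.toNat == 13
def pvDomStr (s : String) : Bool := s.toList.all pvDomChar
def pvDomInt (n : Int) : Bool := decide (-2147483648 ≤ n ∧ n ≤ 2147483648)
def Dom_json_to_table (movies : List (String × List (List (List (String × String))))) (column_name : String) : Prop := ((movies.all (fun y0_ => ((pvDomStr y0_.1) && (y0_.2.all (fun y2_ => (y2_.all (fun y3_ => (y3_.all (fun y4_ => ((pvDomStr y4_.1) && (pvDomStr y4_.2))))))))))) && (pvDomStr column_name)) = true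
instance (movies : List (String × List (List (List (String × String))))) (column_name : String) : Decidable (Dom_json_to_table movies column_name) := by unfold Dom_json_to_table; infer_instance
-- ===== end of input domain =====

-- B replaces A's single nested pass carrying two accumulators (dict + seen-set) by three
-- staged passes: flatten to a flat (id, name) list, compute the first index per name,
-- then build the dict from the pairs standing at their name's first index. Same cost.

-- ===== PORT A =====
-- one iteration of A's inner loop body, over the pair state (entities, entitities_values)
def jtStepA (st : PySem.Dict String String × PySem.Set String)
    (x : List (String × String)) : PySem.Dict String String × PySem.Set String :=
  let key := (PySem.Dict.mk x).getD "id" ""        -- x["id"]; Pre_ guarantees presence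
  let value := (PySem.Dict.mk x).getD "name" ""    -- x["name"]; Pre_ guarantees presence
  if PySem.Set.contains st.2 value then st
  else (st.1.insert key value, PySem.Set.add st.2 value)

def json_to_table (movies : List (String × List (List (List (String × String))))) (column_name : String) : List (String × String) :=
  let lines := (PySem.Dict.mk movies).getD column_name []   -- movies[column_name]; Pre_ guarantees the key
  (lines.foldl (fun st line => line.foldl jtStepA st)
    ((PySem.Dict.empty : PySem.Dict String String), ([] : PySem.Set String))).1.items

-- ===== PORT B =====
-- the flattening comprehension [(x["id"], x["name"]) for line in movies[column_name] for x in line]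
def jtExtract (x : List (String × String)) : String × String :=
  ((PySem.Dict.mk x).getD "id" "", (PySem.Dict.mk x).getD "name" "")   -- Pre_ guarantees both keys

def jtPairs (lines : List (List (List (String × String)))) : List (String × String) :=
  lines.flatMap (fun line => line.map jtExtract)

-- the first_idx loop: first index at which each name occurs
def jtFirstIdx (pairs : List (String × String)) : PySem.Dict String Int :=
  (PySem.List.enumerate pairs).foldl
    (fun d ip => if d.contains ip.2.2 then d else d.insert ip.2.2 ip.1)
    PySem.Dict.empty

def json_to_table_alt (movies : List (String × List (List (List (String × String))))) (column_name : String) : List (String × String) :=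
  let pairs := jtPairs ((PySem.Dict.mk movies).getD column_name [])
  let firstIdx := jtFirstIdx pairs
  -- dict(p for i, p in enumerate(pairs) if first_idx[p[1]] == i); the lookup
  -- first_idx[p[1]] always succeeds (every name was indexed), so getD's default is unreachable
  ((PySem.List.enumerate pairs).foldl
    (fun e ip => if firstIdx.getD ip.2.2 (-1) == ip.1 then e.insert ip.2.1 ip.2.2 else e)
    PySem.Dict.empty).items

-- ===== PRECONDITION & SPEC =====
-- A raises KeyError when column_name is absent from movies, or some inner dict x lacks
-- the key "id" or "name"; Pre_ excludes exactly those inputs.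
def Pre_json_to_table (movies : List (String × List (List (List (String × String))))) (column_name : String) : Prop :=
  ((PySem.Dict.mk movies).get? column_name).isSome ∧
  ∀ line ∈ (PySem.Dict.mk movies).getD column_name [], ∀ x ∈ line,
    ((PySem.Dict.mk x).get? "id").isSome ∧ ((PySem.Dict.mk x).get? "name").isSome
instance (movies : List (String × List (List (List (String × String))))) (column_name : String) : Decidable (Pre_json_to_table movies column_name) := by unfold Pre_json_to_table; infer_instance

def pvWitness_json_to_table : (List (String × List (List (List (String × String))))) × String :=
  ([("c", [[[("id", "1"), ("name", "n")], [("id", "2"), ("name", "n")]], [[("id", "1"), ("name", "m")]]])], "c")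

def Spec_json_to_table (movies : List (String × List (List (List (String × String))))) (column_name : String) (out : List (String × String)) : Prop := out = json_to_table_alt movies column_name
instance (movies : List (String × List (List (List (String × String))))) (column_name : String) (out : List (String × String)) : Decidable (Spec_json_to_table movies column_name out) := by unfold Spec_json_to_table; infer_instance

-- ===== CLAIM (what is proved, stated in full; the proofs are below) =====
def Claim_equal_json_to_table : Prop := ∀ (movies : List (String × List (List (List (String × String))))) (column_name : String), Dom_json_to_table movies column_name → Pre_json_to_table movies column_name → Spec_json_to_table movies column_name (json_to_table movies column_name)

-- ===== LEMMAS AND PROOFS =====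

-- the common normal form both programs are reduced to: the sublist of pairs whose name
-- has not occurred before (first occurrence per name, in order)
def jtKept (ps : List (String × String)) (seen : List String) : List (String × String) :=
  match ps with
  | [] => []
  | p :: t => if p.2 ∈ seen then jtKept t seen else p :: jtKept t (p.2 :: seen)

theorem jtKept_congr (ps : List (String × String)) (s1 s2 : List String)
    (h : ∀ x, x ∈ s1 ↔ x ∈ s2) : jtKept ps s1 = jtKept ps s2 := by
  induction ps generalizing s1 s2 with
  | nil => rfl
  | cons p t ih =>
    unfold jtKept
    by_cases hm : p.2 ∈ s1
    · rw [if_pos hm, if_pos ((h p.2).mp hm)]; exact ih s1 s2 h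
    · rw [if_neg hm, if_neg (fun hx => hm ((h p.2).mpr hx))]
      exact congrArg _ (ih _ _ (by intro x; simp only [List.mem_cons]; rw [h x]))

-- A's loop body, over an already-extracted pair
def jtStepP (st : PySem.Dict String String × PySem.Set String) (p : String × String) :
    PySem.Dict String String × PySem.Set String :=
  if PySem.Set.contains st.2 p.2 then st
  else (st.1.insert p.1 p.2, PySem.Set.add st.2 p.2)

theorem jtA_flat (lines : List (List (List (String × String))))
    (st : PySem.Dict String String × PySem.Set String) :
    lines.foldl (fun st line => line.foldl jtStepA st) st = (jtPairs lines).foldl jtStepP st := by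
  rw [jtPairs, List.foldl_flatMap]
  simp only [List.foldl_map]
  rfl

theorem jtAfold (ps : List (String × String)) (e : PySem.Dict String String)
    (seen : List String) :
    (ps.foldl jtStepP (e, seen)).1 = (jtKept ps seen).foldl (fun e p => e.insert p.1 p.2) e := by
  induction ps generalizing e seen with
  | nil => rfl
  | cons p t ih =>
    unfold jtKept
    by_cases hm : p.2 ∈ seen
    · have hc : PySem.Set.contains seen p.2 = true := by
        rw [PySem.Set.contains_eq_decide]; exact decide_eq_true hm
      simp only [List.foldl_cons, jtStepP, hc, if_true, if_pos hm]
      exact ih e seen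
    · have hc : PySem.Set.contains seen p.2 = false := by
        rw [PySem.Set.contains_eq_decide]; exact decide_eq_false hm
      simp only [List.foldl_cons, jtStepP, hc, Bool.false_eq_true, if_false, if_neg hm,
        List.foldl_cons]
      rw [ih]
      refine congrArg (fun l => List.foldl _ _ l) ?_
      rw [PySem.Set.add_of_not_mem hm]
      exact jtKept_congr t _ _ (by intro x; simp [or_comm])

-- characterisation of the first_idx loop: lookup = first matching index, offset by the start
theorem jtFI_get? (ps : List (String × String)) (s : Int) (d : PySem.Dict String Int)
    (n : String) :
    ((PySem.List.enumerate ps s).foldl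
        (fun d ip => if d.contains ip.2.2 then d else d.insert ip.2.2 ip.1) d).get? n
      = (d.get? n).or ((ps.findIdx? (fun q => q.2 == n)).map (fun j : Nat => s + (j : Int))) := by
  induction ps generalizing s d with
  | nil => simp [PySem.List.enumerate_nil]
  | cons q t ih =>
    rw [PySem.List.enumerate_cons, List.foldl_cons, List.findIdx?_cons]
    by_cases hqn : q.2 = n
    · subst hqn
      by_cases hc : d.contains q.2 = true
      · obtain ⟨v, hv⟩ : ∃ v, d.get? q.2 = some v := by
          have := PySem.Dict.contains_eq_isSome_get? (d := d) (k := q.2)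
          rw [hc] at this
          exact Option.isSome_iff_exists.mp this.symm
        simp only [hc, ih, hv, Option.some_or, beq_self_eq_true, if_pos]
      · rw [Bool.not_eq_true] at hc
        have hnone : d.get? q.2 = none := by
          have := PySem.Dict.contains_eq_isSome_get? (d := d) (k := q.2)
          rw [hc] at this
          cases h : d.get? q.2 with
          | none => rfl
          | some v => rw [h] at this; simp at this
        simp only [hc, Bool.false_eq_true, if_false, ih, PySem.Dict.get?_insert_self,
          Option.some_or, hnone, Option.none_or, beq_self_eq_true, if_pos]
        norm_num
    · have hbeq : (q.2 == n) = false := beq_eq_false_iff_ne.mpr hqn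
      have hget : ∀ d' : PySem.Dict String Int,
          (if d.contains q.2 then d else d.insert q.2 s) = d' → d'.get? n = d.get? n := by
        intro d' hd'
        subst hd'
        split
        · rfl
        · exact PySem.Dict.get?_insert_of_ne _ _ (Ne.symm hqn)
      rw [ih, hget _ rfl, hbeq, if_neg (by simp)]
      cases h : t.findIdx? (fun q => q.2 == n) with
      | none => simp
      | some j =>
        have h2 : s + 1 + (j : Int) = s + (((j + 1 : Nat) : Int)) := by push_cast; ring
        simp only [Option.map_some, h2]

-- the filter condition of B's dict(): index == first index ⟺ the name is new at that point
theorem jtFI_cond (pre t : List (String × String)) (p : String × String) :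
    ((jtFirstIdx (pre ++ p :: t)).getD p.2 (-1) == (pre.length : Int))
      = decide (p.2 ∉ pre.map Prod.snd) := by
  have hget := jtFI_get? (pre ++ p :: t) 0 PySem.Dict.empty p.2
  rw [PySem.Dict.get?_empty, Option.none_or, List.findIdx?_append] at hget
  by_cases hm : p.2 ∈ pre.map Prod.snd
  · obtain ⟨q, hq, hqn⟩ := List.mem_map.mp hm
    have hne : pre.findIdx? (fun q => q.2 == p.2) ≠ none := by
      rw [Ne, List.findIdx?_eq_none_iff]
      intro hall
      have := hall q hq
      rw [hqn] at this
      simp at this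
    obtain ⟨j, hj⟩ := Option.ne_none_iff_exists'.mp hne
    have hjlt : j < pre.length := ((List.findIdx?_eq_some_iff_findIdx_eq).mp hj).1
    rw [hj] at hget
    unfold jtFirstIdx
    rw [PySem.Dict.getD_eq_get?_getD, hget]
    simp only [Option.some_or, Option.map_some, Option.getD_some, decide_eq_false (not_not_intro hm)]
    rw [beq_eq_false_iff_ne]
    intro habs
    omega
  · have hnone : pre.findIdx? (fun q => q.2 == p.2) = none := by
      rw [List.findIdx?_eq_none_iff]
      intro x hx
      rw [beq_eq_false_iff_ne]
      intro habs
      exact hm (List.mem_map.mpr ⟨x, hx, habs⟩)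
    rw [hnone, List.findIdx?_cons, beq_self_eq_true, if_pos rfl] at hget
    unfold jtFirstIdx
    rw [PySem.Dict.getD_eq_get?_getD, hget]
    simp [hm]

theorem jtBfold (ps : List (String × String)) (t pre : List (String × String))
    (e : PySem.Dict String String) (h : ps = pre ++ t) :
    (PySem.List.enumerate t (pre.length : Int)).foldl
        (fun e ip => if (jtFirstIdx ps).getD ip.2.2 (-1) == ip.1 then e.insert ip.2.1 ip.2.2 else e) e
      = (jtKept t (pre.map Prod.snd)).foldl (fun e p => e.insert p.1 p.2) e := by
  induction t generalizing pre e with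
  | nil => rfl
  | cons p t' ih =>
    subst h
    rw [PySem.List.enumerate_cons, List.foldl_cons, jtFI_cond pre t' p]
    have hlen : ((pre ++ [p]).length : Int) = (pre.length : Int) + 1 := by
      simp [List.length_append]
    unfold jtKept
    by_cases hm : p.2 ∈ pre.map Prod.snd
    · have hih := ih (pre ++ [p]) e (by simp)
      rw [hlen] at hih
      rw [decide_eq_false (not_not_intro hm)]
      simp only [Bool.false_eq_true, if_false]
      rw [if_pos hm, hih]
      refine congrArg (fun l => List.foldl _ _ l) ?_
      refine jtKept_congr t' _ _ ?_
      intro x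
      constructor
      · intro hx
        rcases (by simpa using hx : x ∈ pre.map Prod.snd ∨ x = p.2) with hx1 | hx2
        · exact hx1
        · rw [hx2]; exact hm
      · intro hx
        simp [hx]
    · have hih := ih (pre ++ [p]) (e.insert p.1 p.2) (by simp)
      rw [hlen] at hih
      rw [decide_eq_true hm, if_pos rfl, if_neg hm, List.foldl_cons, hih]
      refine congrArg (fun l => List.foldl _ _ l) ?_
      refine jtKept_congr t' _ _ ?_
      intro x
      simp [or_comm]

-- ===== VERDICT (by name: the statement is the Claim_ definition above) =====
theorem json_to_table_spec : Claim_equal_json_to_table := by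
  intro movies column_name _ _
  unfold Spec_json_to_table json_to_table json_to_table_alt
  simp only []
  rw [jtA_flat, jtAfold]
  have hb := jtBfold (jtPairs ((PySem.Dict.mk movies).getD column_name []))
    (jtPairs ((PySem.Dict.mk movies).getD column_name [])) [] PySem.Dict.empty rfl
  simp only [List.length_nil, Nat.cast_zero, List.map_nil] at hb
  rw [hb]
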